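-- pv_equiv track=rewrite | github.com/quinndupont/MACHINIC-DELIRIUM | convert_to_markdown.py | chunk_text_by_structure
-- ===== SOURCE A (Python) =====
-- def chunk_text_by_structure(text):
--     """Chunk text by sections - each section (## ALL CAPS heading) becomes one chunk."""
--     lines = text.split('\n')
--     chunks = []
--
--     # Find all section boundaries (lines starting with ## )
--     section_indices = []
--     for i, line in enumerate(lines):
--         stripped = line.strip()
--         if stripped.startswith('## '):
--             section_indices.append(i)
--
--     # If no sections found, return entire text as one chunk
--     if not section_indices:
--         return [text]
--
--     # Process each section
--     for section_idx in range(len(section_indices)):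
--         start_idx = section_indices[section_idx]
--         # End index is start of next section, or end of text
--         end_idx = section_indices[section_idx + 1] if section_idx + 1 < len(section_indices) else len(lines)
--
--         # Extract section lines
--         section_lines = lines[start_idx:end_idx]
--         section_text = '\n'.join(section_lines)
--
--         # Only add non-empty chunks
--         if section_text.strip():
--             chunks.append(section_text)
--
--     return chunks
-- ===== SOURCE B (Python) =====
-- def chunk_text_by_structure(text):
--     """Chunk text by sections - single streaming pass with a current-section accumulator."""
--     chunks = []
--     current = None
--     for line in text.split('\n'):
--         if line.strip().startswith('## '):
--             if current is not None:
--                 section = '\n'.join(current)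
--                 if section.strip():
--                     chunks.append(section)
--             current = [line]
--         elif current is not None:
--             current.append(line)
--     if current is None:
--         return [text]
--     section = '\n'.join(current)
--     if section.strip():
--         chunks.append(section)
--     return chunks
-- ===== Notes on version B (the rewrite author's own statement) =====
-- stated objective: alternative
-- what changed: Replaced A's two-phase index-then-slice design (collect all heading positions, then re-slice the line list between consecutive indices) with a single streaming pass that keeps a current-section accumulator and flushes it at each heading and at the end.
import Mathlib
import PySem

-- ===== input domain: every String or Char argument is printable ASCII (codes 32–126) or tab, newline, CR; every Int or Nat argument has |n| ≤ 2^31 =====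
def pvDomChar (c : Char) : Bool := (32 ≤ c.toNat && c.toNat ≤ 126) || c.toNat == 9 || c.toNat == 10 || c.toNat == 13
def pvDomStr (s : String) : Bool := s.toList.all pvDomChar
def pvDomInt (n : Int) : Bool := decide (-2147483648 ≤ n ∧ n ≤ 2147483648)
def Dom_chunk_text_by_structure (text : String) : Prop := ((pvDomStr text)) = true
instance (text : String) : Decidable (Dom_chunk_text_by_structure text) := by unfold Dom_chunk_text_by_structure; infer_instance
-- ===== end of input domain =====

-- B replaces A's collect-all-heading-indices-then-slice design with a single streaming
-- pass over the lines keeping a current-section accumulator (alternative decomposition, same cost).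
-- In both ports, text.split('\n') is PySem.Str.split? with the literal separator "\n" ≠ "",
-- which is always `some`, so `.getD []` is exact.

-- ===== PORT A =====
def chunk_text_by_structure (text : String) : List String :=
  let lines := (PySem.Str.split? text "\n").getD []
  let sec_indices : List Int :=
    (PySem.List.enumerate lines 0).foldl
      (fun acc il =>
        if PySem.Str.startswith (PySem.Str.strip il.2) "## " then acc ++ [il.1] else acc) []
  if sec_indices = [] then [text]
  else
    (PySem.List.pyRange 0 (sec_indices.length : Int) 1).foldl
      (fun chunks sec_idx =>
        let start_idx := PySem.List.pyGetD sec_indices sec_idx 0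
        let end_idx :=
          if sec_idx + 1 < (sec_indices.length : Int)
          then PySem.List.pyGetD sec_indices (sec_idx + 1) 0
          else (lines.length : Int)
        let sec_text := PySem.Str.join "\n" (PySem.List.slice lines (some start_idx) (some end_idx))
        if PySem.Str.strip sec_text ≠ "" then chunks ++ [sec_text] else chunks)
      []

-- ===== PORT B =====
/-- the body of B's for-loop: flush the current section at a heading, else extend it -/
def stepB (st : List String × Option (List String)) (line : String) : List String × Option (List String) :=
  if PySem.Str.startswith (PySem.Str.strip line) "## " then
    match st.2 with
    | none => (st.1, some [line])
    | some cur =>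
      let sec := PySem.Str.join "\n" cur
      (if PySem.Str.strip sec ≠ "" then st.1 ++ [sec] else st.1, some [line])
  else
    match st.2 with
    | none => st
    | some cur => (st.1, some (cur ++ [line]))

def chunk_text_by_structure_alt (text : String) : List String :=
  let st := ((PySem.Str.split? text "\n").getD []).foldl stepB ([], none)
  match st.2 with
  | none => [text]
  | some cur =>
    let sec := PySem.Str.join "\n" cur
    if PySem.Str.strip sec ≠ "" then st.1 ++ [sec] else st.1

-- ===== PRECONDITION & SPEC =====
def Spec_chunk_text_by_structure (text : String) (out : List String) : Prop := out = chunk_text_by_structure_alt text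
instance (text : String) (out : List String) : Decidable (Spec_chunk_text_by_structure text out) := by unfold Spec_chunk_text_by_structure; infer_instance

-- ===== CLAIM (what is proved, stated in full; the proofs are below) =====
def Claim_equal_chunk_text_by_structure : Prop := ∀ (text : String), Dom_chunk_text_by_structure text → Spec_chunk_text_by_structure text (chunk_text_by_structure text)

-- ===== LEMMAS AND PROOFS =====

/-- the heading test both programs apply to a line -/
def pHead (l : String) : Bool := PySem.Str.startswith (PySem.Str.strip l) "## "

/-- join a section's lines, keep it iff its strip is non-empty (shared by both programs) -/
def flushOne (c : List String) : List String :=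
  if PySem.Str.strip (PySem.Str.join "\n" c) ≠ "" then [PySem.Str.join "\n" c] else []

/-- sections of a line list: each heading line together with the following non-heading lines -/
def secsList : List String → List (List String)
  | [] => []
  | l :: ls => if pHead l then (l :: ls.takeWhile (fun x => !pHead x)) :: secsList ls else secsList ls

def specChunks (ls : List String) : List String := (secsList ls).flatMap flushOne

/-- positions of heading lines -/
def natIdxs : List String → List Nat
  | [] => []
  | l :: ls => if pHead l then 0 :: (natIdxs ls).map (· + 1) else (natIdxs ls).map (· + 1)

/-- A's chunks from an Int index list (a suffix of the full index list) -/
def chunksIdxI (ls : List String) : List Int → List String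
  | [] => []
  | [i] => flushOne (PySem.List.slice ls (some i) (some (ls.length : Int)))
  | i :: j :: rest => flushOne (PySem.List.slice ls (some i) (some j)) ++ chunksIdxI ls (j :: rest)

/-- A's chunks from Nat indices, slices resolved to drop/take -/
def chunksNat (ls : List String) : List Nat → List String
  | [] => []
  | [i] => flushOne (ls.drop i)
  | i :: j :: rest => flushOne ((ls.drop i).take (j - i)) ++ chunksNat ls (j :: rest)

lemma append_flush (acc : List String) (s : String) :
    (if PySem.Str.strip s ≠ "" then acc ++ [s] else acc)
      = acc ++ (if PySem.Str.strip s ≠ "" then [s] else []) := by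
  split_ifs <;> simp

lemma flushOne_join (c : List String) :
    (if PySem.Str.strip (PySem.Str.join "\n" c) ≠ "" then [PySem.Str.join "\n" c] else [])
      = flushOne c := rfl

lemma natIdxs_eq_nil (ls : List String) :
    natIdxs ls = [] ↔ ls.all (fun l => !pHead l) = true := by
  induction ls with
  | nil => simp [natIdxs]
  | cons l ls ih => by_cases h : pHead l <;> simp [natIdxs, h, ih]

lemma secsList_eq_nil (ls : List String) (h : ls.all (fun l => !pHead l) = true) :
    secsList ls = [] := by
  induction ls with
  | nil => rfl
  | cons l ls ih =>
    simp only [List.all_cons, Bool.and_eq_true, Bool.not_eq_eq_eq_not, Bool.not_true] at h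
    simp [secsList, h.1, ih h.2]

lemma takeWhile_of_natIdxs_cons (ls : List String) (j : Nat) (rest : List Nat)
    (h : natIdxs ls = j :: rest) : ls.takeWhile (fun x => !pHead x) = ls.take j := by
  induction ls generalizing j rest with
  | nil => simp [natIdxs] at h
  | cons x xs ih =>
    by_cases hx : pHead x
    · simp only [natIdxs, hx, if_true, List.cons.injEq] at h
      simp [hx, ← h.1]
    · simp [natIdxs, hx] at h
      cases hxs : natIdxs xs with
      | nil => rw [hxs] at h; simp at h
      | cons j' r' =>
        rw [hxs] at h
        simp only [List.map_cons, List.cons.injEq] at h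
        rw [List.takeWhile_cons, ← h.1]
        simp [hx, ih j' r' hxs]

lemma chunksNat_shift (l : String) (ls : List String) (js : List Nat) :
    chunksNat (l :: ls) (js.map (· + 1)) = chunksNat ls js := by
  induction js with
  | nil => rfl
  | cons i tail ih =>
    cases tail with
    | nil => simp [chunksNat, List.drop_succ_cons]
    | cons j rest =>
      simp only [List.map_cons] at ih ⊢
      simp only [chunksNat, List.drop_succ_cons, Nat.add_sub_add_right, ih]

lemma chunksNat_natIdxs (ls : List String) : chunksNat ls (natIdxs ls) = specChunks ls := by
  induction ls with
  | nil => rfl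
  | cons l ls ih =>
    by_cases h : pHead l
    · rw [show natIdxs (l :: ls) = 0 :: (natIdxs ls).map (· + 1) from by simp [natIdxs, h]]
      cases hjs : natIdxs ls with
      | nil =>
        have hall := (natIdxs_eq_nil ls).mp hjs
        simp only [List.map_nil, chunksNat, List.drop_zero, specChunks, secsList, h, if_true,
          secsList_eq_nil ls hall, List.flatMap_cons, List.flatMap_nil, List.append_nil]
        rw [List.takeWhile_eq_self_iff.mpr (by simpa using hall)]
      | cons j rest =>
        rw [hjs] at ih
        rw [show ((0 : Nat) :: (j :: rest).map (· + 1)) = 0 :: (j+1) :: rest.map (· + 1) from by simp]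
        simp only [chunksNat, List.drop_zero, Nat.sub_zero]
        rw [show ((j+1) :: rest.map (· + 1)) = (j :: rest).map (· + 1) from by simp,
          chunksNat_shift, ih]
        simp only [specChunks, secsList, h, if_true, List.flatMap_cons]
        congr 2
        rw [takeWhile_of_natIdxs_cons ls j rest hjs]
        simp [List.take_succ_cons]
    · simp [natIdxs, h, chunksNat_shift, ih, specChunks, secsList]

lemma chunksIdxI_cast (ls : List String) (js : List Nat) :
    chunksIdxI ls (js.map (Nat.cast)) = chunksNat ls js := by
  induction js with
  | nil => rfl
  | cons i tail ih =>
    cases tail with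
    | nil =>
      simp only [List.map_cons, List.map_nil, chunksIdxI, chunksNat]
      rw [PySem.List.slice_natCast]
      congr 1
      exact List.take_of_length_le (by simp)
    | cons j rest =>
      simp only [List.map_cons] at ih ⊢
      simp only [chunksIdxI, chunksNat, ih]
      rw [PySem.List.slice_natCast]

lemma map_shift_cast (s : Int) (js : List Nat) :
    js.map ((fun j : Nat => s + (j : Int)) ∘ (· + 1)) = js.map (fun j : Nat => (s + 1) + (j : Int)) := by
  apply List.map_congr_left
  intro j _
  simp only [Function.comp_apply]
  push_cast
  ring

lemma enum_fold (ls : List String) (s : Int) (acc : List Int) :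
    (PySem.List.enumerate ls s).foldl
      (fun acc il =>
        if PySem.Str.startswith (PySem.Str.strip il.2) "## " then acc ++ [il.1] else acc) acc
    = acc ++ (natIdxs ls).map (fun j : Nat => s + (j : Int)) := by
  induction ls generalizing s acc with
  | nil => simp [PySem.List.enumerate_nil, natIdxs]
  | cons l ls ih =>
    rw [PySem.List.enumerate_cons, List.foldl_cons]
    by_cases h : pHead l
    · have h' : PySem.Str.startswith (PySem.Str.strip l) "## " = true := h
      simp only [h', if_true, ih]
      rw [show natIdxs (l :: ls) = 0 :: (natIdxs ls).map (· + 1) from by simp [natIdxs, h],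
        List.map_cons, List.map_map, map_shift_cast]
      simp
    · have h' : PySem.Str.startswith (PySem.Str.strip l) "## " = false := by
        simpa [pHead] using h
      simp only [h', Bool.false_eq_true, if_false, ih]
      rw [show natIdxs (l :: ls) = (natIdxs ls).map (· + 1) from by simp [natIdxs, h],
        List.map_map, map_shift_cast]

lemma A_fold (ls : List String) (is : List Int) (k : Nat) (acc : List String) (hk : k ≤ is.length) :
    (PySem.List.pyRange (k : Int) (is.length : Int) 1).foldl
      (fun chunks sec_idx =>
        let start_idx := PySem.List.pyGetD is sec_idx 0
        let end_idx :=
          if sec_idx + 1 < (is.length : Int)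
          then PySem.List.pyGetD is (sec_idx + 1) 0
          else (ls.length : Int)
        let sec_text := PySem.Str.join "\n" (PySem.List.slice ls (some start_idx) (some end_idx))
        if PySem.Str.strip sec_text ≠ "" then chunks ++ [sec_text] else chunks) acc
    = acc ++ chunksIdxI ls (is.drop k) := by
  suffices H : ∀ (m k : Nat) (acc : List String), k ≤ is.length → is.length - k = m →
      (PySem.List.pyRange (k : Int) (is.length : Int) 1).foldl
        (fun chunks sec_idx =>
          let start_idx := PySem.List.pyGetD is sec_idx 0
          let end_idx :=
            if sec_idx + 1 < (is.length : Int)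
            then PySem.List.pyGetD is (sec_idx + 1) 0
            else (ls.length : Int)
          let sec_text := PySem.Str.join "\n" (PySem.List.slice ls (some start_idx) (some end_idx))
          if PySem.Str.strip sec_text ≠ "" then chunks ++ [sec_text] else chunks) acc
      = acc ++ chunksIdxI ls (is.drop k) by
    exact H (is.length - k) k acc hk rfl
  intro m
  induction m with
  | zero =>
    intro k acc hk hm
    rw [PySem.List.pyRange_one_eq_nil (by exact_mod_cast (by omega : is.length ≤ k)),
      List.foldl_nil, List.drop_eq_nil_of_le (by omega)]
    simp [chunksIdxI]
  | succ m ih =>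
    intro k acc hk hm
    have hlt : k < is.length := by omega
    rw [PySem.List.pyRange_one_cons (by exact_mod_cast hlt), List.foldl_cons,
      show ((k : Int) + 1) = (((k + 1 : Nat)) : Int) from by push_cast; ring]
    simp only [PySem.List.pyGetD_natCast, Nat.cast_lt]
    rw [List.getD_eq_getElem is 0 hlt]
    by_cases hc : k + 1 < is.length
    · rw [if_pos hc, List.getD_eq_getElem is 0 hc, append_flush, flushOne_join,
        ih (k + 1) _ (by omega) (by omega),
        List.drop_eq_getElem_cons hlt, List.drop_eq_getElem_cons hc]
      simp [chunksIdxI, List.append_assoc]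
    · rw [if_neg hc,
        PySem.List.pyRange_one_eq_nil (by exact_mod_cast (by omega : is.length ≤ k + 1)),
        List.foldl_nil, append_flush, flushOne_join,
        List.drop_eq_getElem_cons hlt, List.drop_eq_nil_of_le (by omega : is.length ≤ k + 1)]
      simp [chunksIdxI]

lemma B_fold (ls : List String) (cur out : List String) :
    (ls.foldl stepB (out, some cur)).2.isSome = true ∧
    (match (ls.foldl stepB (out, some cur)).2 with
      | none => (ls.foldl stepB (out, some cur)).1
      | some c => (ls.foldl stepB (out, some cur)).1 ++ flushOne c)
    = out ++ flushOne (cur ++ ls.takeWhile (fun x => !pHead x)) ++ specChunks ls := by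
  induction ls generalizing cur out with
  | nil => exact ⟨rfl, by simp [specChunks, secsList]⟩
  | cons l ls ih =>
    rw [List.foldl_cons]
    by_cases h : pHead l
    · have hs : stepB (out, some cur) l = (out ++ flushOne cur, some [l]) := by
        simp only [stepB, show PySem.Str.startswith (PySem.Str.strip l) "## " = true from h,
          if_true]
        rw [append_flush, flushOne_join]
      rw [hs]
      refine ⟨(ih [l] (out ++ flushOne cur)).1, ?_⟩
      rw [(ih [l] (out ++ flushOne cur)).2,
        show (l :: ls).takeWhile (fun x => !pHead x) = [] from by simp [h]]
      simp [specChunks, secsList, h, List.append_assoc]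
    · have h' : PySem.Str.startswith (PySem.Str.strip l) "## " = false := by
        simpa [pHead] using h
      have hs : stepB (out, some cur) l = (out, some (cur ++ [l])) := by
        simp only [stepB, h', Bool.false_eq_true, if_false]
      rw [hs]
      refine ⟨(ih (cur ++ [l]) out).1, ?_⟩
      rw [(ih (cur ++ [l]) out).2,
        show (l :: ls).takeWhile (fun x => !pHead x) = l :: ls.takeWhile (fun x => !pHead x)
          from by simp [h]]
      simp [specChunks, secsList, h, List.append_assoc]

lemma B_from_none (ls : List String) :
    (ls.all (fun l => !pHead l) = true ∧ ls.foldl stepB ([], none) = ([], none)) ∨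
    (ls.all (fun l => !pHead l) = false ∧
      (ls.foldl stepB ([], none)).2.isSome = true ∧
      (match (ls.foldl stepB ([], none)).2 with
        | none => (ls.foldl stepB ([], none)).1
        | some c => (ls.foldl stepB ([], none)).1 ++ flushOne c) = specChunks ls) := by
  induction ls with
  | nil => exact Or.inl ⟨by simp, rfl⟩
  | cons l ls ih =>
    rw [List.foldl_cons]
    by_cases h : pHead l
    · have hs : stepB ([], none) l = ([], some [l]) := by
        simp only [stepB, show PySem.Str.startswith (PySem.Str.strip l) "## " = true from h,
          if_true]
      rw [hs]
      refine Or.inr ⟨by simp [h], (B_fold ls [l] []).1, ?_⟩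
      rw [(B_fold ls [l] []).2]
      simp [specChunks, secsList, h]
    · have h' : PySem.Str.startswith (PySem.Str.strip l) "## " = false := by
        simpa [pHead] using h
      have hs : stepB ([], none) l = ([], none) := by
        simp only [stepB, h', Bool.false_eq_true, if_false]
      rw [hs]
      have hsec : specChunks (l :: ls) = specChunks ls := by simp [specChunks, secsList, h]
      rcases ih with ⟨h1, h2⟩ | ⟨h1, h2, h3⟩
      · exact Or.inl ⟨by simp [h, h1], h2⟩
      · exact Or.inr ⟨by simp [h1], h2, by rw [hsec]; exact h3⟩

lemma A_eq (text : String) :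
    chunk_text_by_structure text =
      if ((PySem.Str.split? text "\n").getD []).all (fun l => !pHead l) then [text]
      else specChunks ((PySem.Str.split? text "\n").getD []) := by
  simp only [chunk_text_by_structure]
  rw [enum_fold]
  simp only [List.nil_append]
  rw [show (natIdxs ((PySem.Str.split? text "\n").getD [])).map (fun j : Nat => (0 : Int) + (j : Int))
        = (natIdxs ((PySem.Str.split? text "\n").getD [])).map (Nat.cast)
      from List.map_congr_left (by intro j _; simp)]
  by_cases hnil : natIdxs ((PySem.Str.split? text "\n").getD []) = []
  · rw [hnil]
    simp only [List.map_nil]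
    simp only [if_true]
    rw [if_pos ((natIdxs_eq_nil _).mp hnil)]
  · have hne : (natIdxs ((PySem.Str.split? text "\n").getD [])).map (Nat.cast (R := Int)) ≠ [] := by
      simpa using hnil
    rw [if_neg hne,
      if_neg (show ¬ (((PySem.Str.split? text "\n").getD []).all (fun l => !pHead l) = true)
        from by rw [← natIdxs_eq_nil]; exact hnil)]
    have hA := A_fold ((PySem.Str.split? text "\n").getD [])
      ((natIdxs ((PySem.Str.split? text "\n").getD [])).map (Nat.cast)) 0 [] (by omega)
    rw [List.drop_zero, Nat.cast_zero] at hA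
    rw [hA, chunksIdxI_cast, chunksNat_natIdxs]
    simp

lemma B_eq (text : String) :
    chunk_text_by_structure_alt text =
      if ((PySem.Str.split? text "\n").getD []).all (fun l => !pHead l) then [text]
      else specChunks ((PySem.Str.split? text "\n").getD []) := by
  simp only [chunk_text_by_structure_alt]
  rcases B_from_none ((PySem.Str.split? text "\n").getD []) with ⟨h1, h2⟩ | ⟨h1, h2, h3⟩
  · rw [h2, if_pos h1]
  · rw [if_neg (by simp [h1])]
    obtain ⟨c, hc⟩ := Option.isSome_iff_exists.mp h2
    rw [hc] at h3
    simp only [] at h3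
    rw [hc]
    simp only []
    rw [append_flush, flushOne_join]
    exact h3

-- ===== VERDICT (by name: the statement is the Claim_ definition above) =====
theorem chunk_text_by_structure_spec : Claim_equal_chunk_text_by_structure := by
  intro text _
  unfold Spec_chunk_text_by_structure
  rw [A_eq, B_eq]
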